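-- pv_equiv track=rewrite | github.com/venkysriram23/RetailAssistant | code/app.py | validation_query
-- ===== SOURCE A (Python) =====
-- def validation_query(sql):
--     FORBIDDEN_KEYWORDS = [
--         "DROP", "DELETE", "UPDATE", "INSERT",
--         "ALTER", "TRUNCATE", "ATTACH", "DETACH"
--     ]
--
--     sql_upper = sql.upper()
--     for keyword in FORBIDDEN_KEYWORDS:
--         if keyword in sql_upper:
--             return False
--
--     return True
-- ===== SOURCE B (Python) =====
-- def validation_query(sql):
--     FORBIDDEN_KEYWORDS = (
--         "DROP", "DELETE", "UPDATE", "INSERT",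
--         "ALTER", "TRUNCATE", "ATTACH", "DETACH"
--     )
--     s = sql.upper()
--     for i in range(len(s)):
--         if any(s.startswith(k, i) for k in FORBIDDEN_KEYWORDS):
--             return False
--     return True
-- ===== Notes on version B (the rewrite author's own statement) =====
-- stated objective: alternative
-- what changed: Replaced eight separate substring searches over the uppercased SQL with a single left-to-right scan that at each position checks whether any forbidden keyword starts there.
import Mathlib
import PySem

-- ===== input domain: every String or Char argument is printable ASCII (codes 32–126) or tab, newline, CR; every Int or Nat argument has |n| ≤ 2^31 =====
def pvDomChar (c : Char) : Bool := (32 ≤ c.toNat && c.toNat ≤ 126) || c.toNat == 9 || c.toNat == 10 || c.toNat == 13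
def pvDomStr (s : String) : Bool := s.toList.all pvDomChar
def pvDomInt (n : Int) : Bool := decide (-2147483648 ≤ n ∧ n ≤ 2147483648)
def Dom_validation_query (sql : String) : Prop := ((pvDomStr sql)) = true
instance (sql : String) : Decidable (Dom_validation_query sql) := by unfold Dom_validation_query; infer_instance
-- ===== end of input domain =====

-- B replaces A's eight separate substring searches with one left-to-right scan
-- that at each position asks whether some forbidden keyword starts there (alternative).

-- ===== PORT A =====
-- the for-loop over FORBIDDEN_KEYWORDS with early `return False`
def vqLoopA (su : String) : List String → Bool
  | [] => true
  | k :: rest => if PySem.Str.isIn k su then false else vqLoopA su rest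

def validation_query (sql : String) : Bool :=
  vqLoopA (PySem.Str.upper sql)
    ["DROP", "DELETE", "UPDATE", "INSERT", "ALTER", "TRUNCATE", "ATTACH", "DETACH"]

-- ===== PORT B =====
def vqKws : List (List Char) :=
  ["DROP".toList, "DELETE".toList, "UPDATE".toList, "INSERT".toList,
   "ALTER".toList, "TRUNCATE".toList, "ATTACH".toList, "DETACH".toList]

-- the `for i in range(len(s))` scan: structural recursion over the suffixes of s;
-- s.startswith(k, i) is `startswith` on the i-th suffix
def vqScan : List Char → Bool
  | [] => true
  | c :: rest =>
      if vqKws.any (fun k => PySem.Chars.startswith (c :: rest) k) then false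
      else vqScan rest

def validation_query_alt (sql : String) : Bool :=
  vqScan (PySem.Str.upper sql).toList

-- ===== PRECONDITION & SPEC =====
def Spec_validation_query (sql : String) (out : Bool) : Prop := out = validation_query_alt sql
instance (sql : String) (out : Bool) : Decidable (Spec_validation_query sql out) := by unfold Spec_validation_query; infer_instance

-- ===== CLAIM (what is proved, stated in full; the proofs are below) =====
def Claim_equal_validation_query : Prop := ∀ (sql : String), Dom_validation_query sql → Spec_validation_query sql (validation_query sql)

-- ===== LEMMAS AND PROOFS =====

-- A's loop returns true iff no keyword is a substring of the uppercased string
theorem vqLoopA_eq_true_iff (su : String) (kws : List String) :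
    vqLoopA su kws = true ↔ ∀ k ∈ kws, PySem.Chars.isIn k.toList su.toList = false := by
  induction kws with
  | nil => simp [vqLoopA]
  | cons k rest ih =>
    simp only [vqLoopA]
    split
    next h =>
      simp only [PySem.Str.isIn_eq] at h
      constructor
      · intro h'; exact absurd h' (by simp)
      · intro h'
        have := h' k (by simp)
        rw [h] at this
        exact absurd this (by simp)
    next h =>
      simp only [PySem.Str.isIn_eq, Bool.not_eq_true] at h
      rw [ih]
      constructor
      · intro h' k' hk'
        rcases List.mem_cons.mp hk' with rfl | hm
        · exact h
        · exact h' k' hm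
      · intro h' k' hk'; exact h' k' (List.mem_cons_of_mem _ hk')

-- B's scan returns true iff no keyword occurs at any position
theorem vqScan_eq_true_iff (s : List Char) :
    vqScan s = true ↔ ∀ k ∈ vqKws, ¬ ∃ j, k <+: s.drop j := by
  induction s with
  | nil =>
    simp only [vqScan, List.drop_nil, true_iff]
    rintro k hk ⟨j, hpre⟩
    have : k = [] := List.prefix_nil.mp hpre
    subst this
    simp [vqKws] at hk
  | cons c rest ih =>
    rw [show vqScan (c :: rest)
        = (if vqKws.any (fun k => PySem.Chars.startswith (c :: rest) k) then false
           else vqScan rest) from rfl]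
    by_cases h : vqKws.any (fun k => PySem.Chars.startswith (c :: rest) k) = true
    · rw [if_pos h]
      rw [List.any_eq_true] at h
      obtain ⟨k, hk, hsw⟩ := h
      constructor
      · intro hfalse; exact absurd hfalse (by simp)
      · intro hall
        exact absurd (hall k hk) (fun hno => hno ⟨0, by
          simpa using (PySem.Chars.startswith_iff (c :: rest) k).mp hsw⟩)
    · rw [if_neg h, ih]
      rw [Bool.not_eq_true, List.any_eq_false] at h
      constructor
      · rintro hall k hk ⟨j, hpre⟩
        cases j with
        | zero =>
          have hsw : PySem.Chars.startswith (c :: rest) k = true :=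
            (PySem.Chars.startswith_iff (c :: rest) k).mpr (by simpa using hpre)
          have := h k hk
          rw [hsw] at this
          exact absurd this (by simp)
        | succ j => exact hall k hk ⟨j, by simpa using hpre⟩
      · rintro hall k hk ⟨j, hpre⟩
        exact hall k hk ⟨j + 1, by simpa using hpre⟩

-- keyword correspondence between A's String list and B's char-list list
theorem vqKws_eq : vqKws
    = (["DROP", "DELETE", "UPDATE", "INSERT", "ALTER", "TRUNCATE", "ATTACH", "DETACH"] : List String).map String.toList := by
  decide

-- ===== VERDICT (by name: the statement is the Claim_ definition above) =====
theorem validation_query_spec : Claim_equal_validation_query := by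
  intro sql _
  unfold Spec_validation_query validation_query validation_query_alt
  rw [Bool.eq_iff_iff, vqLoopA_eq_true_iff, vqScan_eq_true_iff, vqKws_eq]
  simp only [List.forall_mem_map]
  constructor
  · intro hall k hk hex
    have hin := (PySem.Chars.exists_prefix_drop_iff_isIn _ _).mp hex
    rw [hall k hk] at hin
    exact absurd hin (by simp)
  · intro hall k hk
    rw [← Bool.not_eq_true]
    intro hin
    exact hall k hk ((PySem.Chars.exists_prefix_drop_iff_isIn _ _).mpr hin)
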